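-- pv_equiv track=rewrite | github.com/abrahamesparza/practice-problems | python/tuple_with_same_product.py | tuple_product
-- ===== SOURCE A (Python) =====
-- from collections import defaultdict
--
-- def tuple_product(nums):
--     product_map = defaultdict(list)
--     for i in range(len(nums)):
--         for j in range(i + 1, len(nums)):
--             product = nums[i] * nums[j]
--             product_map[product].append((nums[i], nums[j]))
--
--     tuple_count = 0
--     for product, pairs in product_map.items():
--         k = len(pairs)
--         if k > 1:
--             tuple_count += 8 * (k * (k - 1) // 2)
--
--     return tuple_count
-- ===== SOURCE B (Python) =====
-- def tuple_product(nums):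
--     n = len(nums)
--     products = sorted(nums[i] * nums[j] for i in range(n) for j in range(i + 1, n))
--     total = 0
--     run = 0
--     prev = None
--     for p in products:
--         if p == prev:
--             run += 1
--         else:
--             run = 1
--             prev = p
--         total += run - 1
--     return 8 * total
-- ===== Notes on version B (the rewrite author's own statement) =====
-- stated objective: alternative
-- what changed: B replaces A's hash-map bucketing plus second aggregation pass with sort-then-scan: it materialises the list of all pairwise products, sorts it, and counts equal-product pairs by scanning runs of equal adjacent values with a run counter.
import Mathlib
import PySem

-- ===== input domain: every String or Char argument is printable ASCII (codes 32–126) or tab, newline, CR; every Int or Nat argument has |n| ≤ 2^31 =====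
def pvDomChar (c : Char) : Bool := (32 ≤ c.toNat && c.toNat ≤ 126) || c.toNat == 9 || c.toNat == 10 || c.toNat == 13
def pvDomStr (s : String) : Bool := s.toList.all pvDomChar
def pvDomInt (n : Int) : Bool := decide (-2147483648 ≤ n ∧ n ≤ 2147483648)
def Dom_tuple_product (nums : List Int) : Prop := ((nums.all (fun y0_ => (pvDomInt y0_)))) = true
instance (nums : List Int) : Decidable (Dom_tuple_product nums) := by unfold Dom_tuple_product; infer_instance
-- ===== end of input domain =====

-- B replaces A's hash-map bucketing + second aggregation pass with sort-then-scan: sort all pairwise products and count runs of equal adjacent values.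


-- ===== PORT A =====
def tuple_product (nums : List Int) : Int :=
  let n : Int := nums.length
  let pm : PySem.Dict Int (List (Int × Int)) :=
    (PySem.List.pyRange 0 n 1).foldl (fun d i =>
      (PySem.List.pyRange (i + 1) n 1).foldl (fun d j =>
        let a := PySem.List.pyGetD nums i 0
        let b := PySem.List.pyGetD nums j 0
        d.modify (a * b) [] (· ++ [(a, b)])) d) PySem.Dict.empty
  pm.items.foldl (fun tc pr =>
    let k : Int := pr.2.length
    if k > 1 then tc + 8 * PySem.Int.floordiv (k * (k - 1)) 2 else tc) 0

-- ===== PORT B =====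
-- `prev = None` is `none`; `p == prev` is `some p = prev`; `total += run - 1` kept literally.
def tuple_product_alt (nums : List Int) : Int :=
  let n : Int := nums.length
  let products : List Int :=
    PySem.List.sorted
      ((PySem.List.pyRange 0 n 1).flatMap (fun i =>
        (PySem.List.pyRange (i + 1) n 1).map (fun j =>
          PySem.List.pyGetD nums i 0 * PySem.List.pyGetD nums j 0)))
      (fun x => x) false
  let st := products.foldl (fun s p =>
      if some p = s.2.2 then (s.1 + ((s.2.1 + 1) - 1), s.2.1 + 1, s.2.2)
      else (s.1 + ((1 : Int) - 1), (1 : Int), some p))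
    ((0 : Int), (0 : Int), (none : Option Int))
  8 * st.1

-- ===== PRECONDITION & SPEC =====
def Spec_tuple_product (nums : List Int) (out : Int) : Prop := out = tuple_product_alt nums
instance (nums : List Int) (out : Int) : Decidable (Spec_tuple_product nums out) := by unfold Spec_tuple_product; infer_instance

-- ===== CLAIM (what is proved, stated in full; the proofs are below) =====
def Claim_equal_tuple_product : Prop := ∀ (nums : List Int), Dom_tuple_product nums → Spec_tuple_product nums (tuple_product nums)

-- ===== LEMMAS AND PROOFS =====

-- number of ordered index pairs i < j carrying equal values of a list
def eqPairs : List Int → Int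
  | [] => 0
  | p :: rest => (rest.count p : Int) + eqPairs rest

-- the (i, j) index pairs both ports iterate over, and the corresponding products / (product, pair) rows
def pvPairs (nums : List Int) : List (Int × Int) :=
  (PySem.List.pyRange 0 (nums.length : Int) 1).flatMap
    (fun i => (PySem.List.pyRange (i + 1) (nums.length : Int) 1).map (fun j => (i, j)))

def pvProds (nums : List Int) : List Int :=
  (pvPairs nums).map (fun q => PySem.List.pyGetD nums q.1 0 * PySem.List.pyGetD nums q.2 0)

def pvKV (nums : List Int) : List (Int × (Int × Int)) :=
  (pvPairs nums).map (fun q =>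
    (PySem.List.pyGetD nums q.1 0 * PySem.List.pyGetD nums q.2 0,
     (PySem.List.pyGetD nums q.1 0, PySem.List.pyGetD nums q.2 0)))

-- flatten a nested foldl into a foldl over the flatMap of index pairs
theorem foldl_foldl {α β σ : Type} (l : List α) (g : α → List β) (f : σ → α → β → σ) (s : σ) :
    l.foldl (fun s i => (g i).foldl (fun s j => f s i j) s) s
      = (l.flatMap (fun i => (g i).map (fun j => (i, j)))).foldl (fun s p => f s p.1 p.2) s := by
  induction l generalizing s with
  | nil => rfl
  | cons a t ih => simp [List.foldl_append, List.foldl_map, ih]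

-- drop all copies of p from a mapped sum, compensating with count * value
theorem sum_filter_ne (s : List Int) (f : Int → Int) (p : Int) :
    ((s.map f).sum : Int)
      = ((s.filter (fun y => !(y == p))).map f).sum + (s.count p : Int) * f p := by
  induction s with
  | nil => simp
  | cons a t ih =>
    by_cases h : a = p
    · subst h; simp [ih]; ring
    · simp [h, ih]; ring

theorem count_ofList (t : List Int) (p : Int) :
    ((PySem.Set.ofList t).count p : Int) = if p ∈ t then 1 else 0 := by
  by_cases hp : p ∈ t
  · rw [List.count_eq_one_of_mem (PySem.Set.nodup_ofList t) (by simpa [PySem.Set.mem_ofList] using hp)]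
    simp [hp]
  · rw [List.count_eq_zero_of_not_mem (by simpa [PySem.Set.mem_ofList] using hp)]
    simp [hp]

-- the grouped sum of k*(k-1) over the distinct values is twice the equal-pair count
theorem sum_choose_eq_two_eqPairs (l : List Int) :
    (((PySem.Set.ofList l).map (fun c => ((l.count c : Int)) * ((l.count c : Int) - 1))).sum)
      = 2 * eqPairs l := by
  induction l with
  | nil => simp [PySem.Set.ofList_nil, eqPairs]
  | cons p t ih =>
    rw [PySem.Set.ofList_cons, List.map_cons, List.sum_cons]
    have htail : ((PySem.Set.ofList t).discard p).map
          (fun c => (((p :: t).count c : Int)) * (((p :: t).count c : Int) - 1))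
        = ((PySem.Set.ofList t).discard p).map
          (fun c => ((t.count c : Int)) * ((t.count c : Int) - 1)) := by
      apply List.map_congr_left
      intro c hc
      have hne : c ≠ p := ((PySem.Set.mem_discard _ _ _).mp hc).2
      simp [Ne.symm hne]
    rw [htail]
    have hfil := sum_filter_ne (PySem.Set.ofList t)
      (fun c => ((t.count c : Int)) * ((t.count c : Int) - 1)) p
    have hdisc : ((PySem.Set.ofList t).discard p)
        = (PySem.Set.ofList t).filter (fun y => !(y == p)) := rfl
    rw [hdisc]
    have hcnt := count_ofList t p
    have hhead : (((p :: t).count p : Int)) = (t.count p : Int) + 1 := by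
      simp
    rw [hhead]
    simp only [eqPairs]
    by_cases hp : p ∈ t
    · rw [hcnt] at hfil
      simp only [if_pos hp] at hfil
      nlinarith [hfil, ih]
    · have h0 : (t.count p : Int) = 0 := by
        exact_mod_cast congrArg Nat.cast (List.count_eq_zero_of_not_mem hp)
      rw [hcnt] at hfil
      simp only [if_neg hp] at hfil
      rw [h0] at *
      nlinarith [hfil, ih]

-- eqPairs only depends on the multiset of values
theorem eqPairs_perm {l l' : List Int} (h : l.Perm l') : eqPairs l = eqPairs l' := by
  induction h with
  | nil => rfl
  | cons a h ih => simp [eqPairs, ih, h.count_eq]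
  | swap a b t =>
    simp only [eqPairs, List.count_cons]
    by_cases h : a = b
    · subst h; push_cast; ring
    · rw [if_neg (by simpa using h), if_neg (by simpa using Ne.symm h)]; push_cast; ring
  | trans _ _ ih1 ih2 => exact ih1.trans ih2

-- invariant of B's run scan on a sorted tail: total gains eqPairs plus run * (occurrences of prev)
theorem scan_inv (l : List Int) (tc r q : Int)
    (hs : l.Pairwise (· ≤ ·)) (hq : ∀ x ∈ l, q ≤ x) :
    (l.foldl (fun s p =>
        if some p = s.2.2 then (s.1 + ((s.2.1 + 1) - 1), s.2.1 + 1, s.2.2)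
        else (s.1 + ((1 : Int) - 1), (1 : Int), some p)) (tc, r, some q)).1
      = tc + eqPairs l + r * (l.count q : Int) := by
  induction l generalizing tc r q with
  | nil => simp [eqPairs]
  | cons p t ih =>
    rcases List.pairwise_cons.mp hs with ⟨hpt, hst⟩
    by_cases hpq : p = q
    · subst hpq
      simp only [List.foldl_cons, if_true]
      rw [ih _ _ _ hst (fun x hx => hpt x hx)]
      simp [eqPairs]
      ring
    · have hqp : q < p := lt_of_le_of_ne (hq p (List.mem_cons_self ..)) (Ne.symm hpq)
      have hne : ¬ (some p = some q) := by simp [hpq]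
      simp only [List.foldl_cons, if_neg hne]
      rw [ih _ _ _ hst (fun x hx => hpt x hx)]
      have hq0 : ((p :: t).count q : Int) = 0 := by
        have : q ∉ p :: t := by
          intro hmem
          rcases List.mem_cons.mp hmem with h | h
          · exact absurd h.symm (ne_of_lt hqp).symm
          · exact absurd (hpt q h) (not_le.mpr hqp)
        exact_mod_cast congrArg Nat.cast (List.count_eq_zero_of_not_mem this)
      rw [hq0]
      simp [eqPairs]
      ring

-- the run scan over a sorted list computes its equal-pair count
theorem scan_sorted (l : List Int) (hs : l.Pairwise (· ≤ ·)) :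
    (l.foldl (fun s p =>
        if some p = s.2.2 then (s.1 + ((s.2.1 + 1) - 1), s.2.1 + 1, s.2.2)
        else (s.1 + ((1 : Int) - 1), (1 : Int), some p))
      ((0 : Int), (0 : Int), (none : Option Int))).1 = eqPairs l := by
  cases l with
  | nil => simp [eqPairs]
  | cons p t =>
    rcases List.pairwise_cons.mp hs with ⟨hpt, hst⟩
    simp only [List.foldl_cons, if_neg (by simp : ¬ (some p = (none : Option Int)))]
    rw [scan_inv t _ _ _ hst hpt]
    simp [eqPairs]
    ring

theorem B_eq (nums : List Int) : tuple_product_alt nums = 8 * eqPairs (pvProds nums) := by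
  show 8 * ((PySem.List.sorted
      ((PySem.List.pyRange 0 (nums.length : Int) 1).flatMap (fun i =>
        (PySem.List.pyRange (i + 1) (nums.length : Int) 1).map (fun j =>
          PySem.List.pyGetD nums i 0 * PySem.List.pyGetD nums j 0)))
      (fun x => x) false).foldl (fun s p =>
        if some p = s.2.2 then (s.1 + ((s.2.1 + 1) - 1), s.2.1 + 1, s.2.2)
        else (s.1 + ((1 : Int) - 1), (1 : Int), some p))
      ((0 : Int), (0 : Int), (none : Option Int))).1 = _
  have hprod : ((PySem.List.pyRange 0 (nums.length : Int) 1).flatMap (fun i =>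
        (PySem.List.pyRange (i + 1) (nums.length : Int) 1).map (fun j =>
          PySem.List.pyGetD nums i 0 * PySem.List.pyGetD nums j 0)))
      = pvProds nums := by
    simp [pvProds, pvPairs, List.map_flatMap, List.map_map, Function.comp_def]
  rw [hprod]
  rw [scan_sorted _ (by
    simpa using PySem.List.sorted_pairwise (pvProds nums) (fun x => x))]
  rw [eqPairs_perm (PySem.List.sorted_perm (pvProds nums) (fun x => x) false)]

-- A's per-bucket term 8*(k*(k-1)//2) in closed form
theorem gsimp (k : Nat) :
    (if ((k : Int)) > 1 then 8 * PySem.Int.floordiv ((k : Int) * ((k : Int) - 1)) 2 else 0)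
      = 4 * ((k : Int) * ((k : Int) - 1)) := by
  by_cases h : ((k : Int)) > 1
  · rw [if_pos h, PySem.Int.floordiv_eq_ediv_of_pos (by norm_num)]
    obtain ⟨m, hm⟩ : Even ((k : Int) * ((k : Int) - 1)) := by
      have h2 := Int.even_mul_succ_self ((k : Int) - 1)
      simpa [mul_comm] using h2
    rw [hm, show m + m = 2 * m by ring, Int.mul_ediv_cancel_left _ (by norm_num)]
    ring
  · rw [if_neg h]
    have : (k : Int) = 0 ∨ (k : Int) = 1 := by omega
    rcases this with h0 | h0 <;> rw [h0] <;> ring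

theorem A_eq (nums : List Int) :
    tuple_product nums = 8 * eqPairs (pvProds nums) := by
  show ((PySem.List.pyRange 0 (nums.length : Int) 1).foldl (fun d i =>
      (PySem.List.pyRange (i + 1) (nums.length : Int) 1).foldl (fun d j =>
        d.modify (PySem.List.pyGetD nums i 0 * PySem.List.pyGetD nums j 0) []
          (· ++ [(PySem.List.pyGetD nums i 0, PySem.List.pyGetD nums j 0)])) d)
      (PySem.Dict.empty : PySem.Dict Int (List (Int × Int)))).items.foldl (fun tc pr =>
        if ((pr.2.length : Int)) > 1 then
          tc + 8 * PySem.Int.floordiv ((pr.2.length : Int) * ((pr.2.length : Int) - 1)) 2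
        else tc) 0 = _
  have h1 : ((PySem.List.pyRange 0 (nums.length : Int) 1).foldl (fun d i =>
      (PySem.List.pyRange (i + 1) (nums.length : Int) 1).foldl (fun d j =>
        d.modify (PySem.List.pyGetD nums i 0 * PySem.List.pyGetD nums j 0) []
          (· ++ [(PySem.List.pyGetD nums i 0, PySem.List.pyGetD nums j 0)])) d)
      (PySem.Dict.empty : PySem.Dict Int (List (Int × Int))))
      = (pvKV nums).foldl (fun d p => d.modify p.1 [] (· ++ [p.2])) PySem.Dict.empty := by
    rw [foldl_foldl _ _ (fun (d : PySem.Dict Int (List (Int × Int))) (i j : Int) =>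
        d.modify (PySem.List.pyGetD nums i 0 * PySem.List.pyGetD nums j 0) []
          (· ++ [(PySem.List.pyGetD nums i 0, PySem.List.pyGetD nums j 0)]))]
    unfold pvKV pvPairs
    rw [List.foldl_map]
  rw [h1]
  set d := (pvKV nums).foldl (fun d p => d.modify p.1 [] (· ++ [p.2])) PySem.Dict.empty with hd
  have hkeys : d.keys = PySem.Set.ofList (pvProds nums) := by
    have h := PySem.Dict.keys_foldl_modify_key (pvKV nums) (fun p => p.1) []
      (fun d p => fun v => v ++ [p.2]) PySem.Dict.empty
    rw [hd]
    simp only [PySem.Dict.keys_empty] at h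
    rw [h, PySem.Set.update_nil_left]
    congr 1
    simp [pvKV, pvProds, Function.comp]
  have hnodup : d.keys.Nodup := by
    rw [hkeys]; exact PySem.Set.nodup_ofList _
  have hlen : ∀ c : Int, (d.getD c []).length = (pvProds nums).count c := by
    intro c
    have h := PySem.Dict.getD_foldl_modify_append (pvKV nums) PySem.Dict.empty c
    rw [hd, h]
    simp [pvKV, pvProds, List.count_eq_countP, List.countP_map, ← List.countP_eq_length_filter]
    rfl
  rw [PySem.Dict.items_eq_map_keys d hnodup [], List.foldl_map]
  have hbody : ∀ (tc : Int) (c : Int),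
      (fun tc (pr : Int × List (Int × Int)) =>
        if ((pr.2.length : Int)) > 1 then
          tc + 8 * PySem.Int.floordiv ((pr.2.length : Int) * ((pr.2.length : Int) - 1)) 2
        else tc) tc (c, d.getD c [])
      = tc + 4 * (((pvProds nums).count c : Int) * (((pvProds nums).count c : Int) - 1)) := by
    intro tc c
    simp only [hlen c]
    rw [← gsimp ((pvProds nums).count c)]
    split_ifs <;> simp
  calc d.keys.foldl (fun tc c =>
        (fun tc (pr : Int × List (Int × Int)) =>
          if ((pr.2.length : Int)) > 1 then
            tc + 8 * PySem.Int.floordiv ((pr.2.length : Int) * ((pr.2.length : Int) - 1)) 2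
          else tc) tc (c, d.getD c [])) 0
      = d.keys.foldl (fun tc c =>
          tc + 4 * (((pvProds nums).count c : Int) * (((pvProds nums).count c : Int) - 1))) 0 := by
        apply PySem.List.foldl_congr_mem
        intro tc c _
        exact hbody tc c
    _ = 8 * eqPairs (pvProds nums) := by
        rw [PySem.List.foldl_add, hkeys]
        rw [List.sum_map_mul_left]
        rw [sum_choose_eq_two_eqPairs]
        ring

-- ===== VERDICT (by name: the statement is the Claim_ definition above) =====
theorem tuple_product_spec : Claim_equal_tuple_product := by
  intro nums _
  unfold Spec_tuple_product
  rw [A_eq, B_eq]
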